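-- pv_equiv track=rewrite | github.com/wyattanderson/proxmox-backup-client-rpm | scripts/vendor-from-archive.py | parse_deb822_paragraphs
-- ===== SOURCE A (Python) =====
-- def parse_deb822_paragraphs(text: str) -> list[dict[str, str]]:
--     paragraphs: list[dict[str, str]] = []
--     current: dict[str, str] = {}
--     current_key: str | None = None
--
--     for raw_line in text.splitlines():
--         if not raw_line:
--             if current:
--                 paragraphs.append(current)
--                 current = {}
--                 current_key = None
--             continue
--         if raw_line.startswith((" ", "\t")):
--             if current_key is None:
--                 raise ValueError(f"continuation line without a key: {raw_line!r}")
--             current[current_key] += "\n" + raw_line[1:]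
--             continue
--         key, value = raw_line.split(":", 1)
--         current_key = key
--         current[key] = value.strip()
--
--     if current:
--         paragraphs.append(current)
--     return paragraphs
-- ===== SOURCE B (Python) =====
-- def _parse_paragraph(lines: list[str]) -> dict[str, str]:
--     fields: dict[str, str] = {}
--     key = None
--     for line in lines:
--         if line.startswith((" ", "\t")):
--             if key is None:
--                 raise ValueError(f"continuation line without a key: {line!r}")
--             fields[key] += "\n" + line[1:]
--         else:
--             key, value = line.split(":", 1)
--             fields[key] = value.strip()
--     return fields
--
--
-- def parse_deb822_paragraphs(text: str) -> list[dict[str, str]]: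
--     groups: list[list[str]] = []
--     buf: list[str] = []
--     for line in text.splitlines():
--         if line == "":
--             if buf:
--                 groups.append(buf)
--             buf = []
--         else:
--             buf.append(line)
--     if buf:
--         groups.append(buf)
--     return [_parse_paragraph(g) for g in groups]
-- ===== Notes on version B (the rewrite author's own statement) =====
-- stated objective: alternative
-- what changed: B first partitions the lines into paragraph groups and then parses each group independently with a _parse_paragraph helper, instead of A's single loop that interleaves paragraph splitting and field parsing in one shared mutable state; Pre_ excludes exactly the inputs where A raises ValueError (a continuation line opening a paragraph, or a non-blank line without a colon), where B raises the same ValueError.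
import Mathlib
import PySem

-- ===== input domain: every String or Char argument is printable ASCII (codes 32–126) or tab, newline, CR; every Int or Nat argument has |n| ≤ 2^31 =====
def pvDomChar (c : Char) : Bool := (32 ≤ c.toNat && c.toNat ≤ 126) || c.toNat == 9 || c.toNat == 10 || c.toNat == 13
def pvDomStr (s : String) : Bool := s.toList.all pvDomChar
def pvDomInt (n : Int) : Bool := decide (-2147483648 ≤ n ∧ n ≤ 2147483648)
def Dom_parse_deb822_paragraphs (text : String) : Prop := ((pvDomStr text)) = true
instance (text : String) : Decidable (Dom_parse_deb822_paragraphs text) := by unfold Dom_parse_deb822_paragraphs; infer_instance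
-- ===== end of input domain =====

-- B parses in two phases (split the lines into paragraph groups, then parse each group with a
-- helper) instead of A's single loop with one shared mutable state; same cost, different decomposition.

-- ===== PORT A =====
-- One fold over the lines carrying (paragraphs, current, current_key), exactly A's loop.
-- In A the two `raise ValueError` branches (continuation without a key; non-blank line without
-- a ':') are only reachable outside Pre_ below; there the port leaves the state unchanged.
-- The `current[current_key] +=` update is ported with Dict.modify; its key is always present
-- inside Pre_ (A would raise KeyError were it absent, which cannot happen: current_key is only
-- ever a key just inserted into current).
def pvStepA (st : List (List (String × String)) × PySem.Dict String String × Option String)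
    (raw_line : String) :
    List (List (String × String)) × PySem.Dict String String × Option String :=
  if raw_line = "" then
    if st.2.1.items ≠ [] then (st.1 ++ [st.2.1.items], PySem.Dict.mk [], none) else st
  else if PySem.Str.startswith raw_line " " || PySem.Str.startswith raw_line "\t" then
    match st.2.2 with
    | none => st
    | some k =>
        (st.1, PySem.Dict.modify st.2.1 k ""
          (fun v => v ++ ("\n" ++ PySem.Str.slice raw_line (some 1) none)), some k)
  else
    match PySem.Str.splitMax? raw_line ":" 1 with
    | some (key :: value :: _) =>
        (st.1, PySem.Dict.insert st.2.1 key (PySem.Str.strip value), some key)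
    | _ => st

def parse_deb822_paragraphs (text : String) : List (List (String × String)) :=
  let st := (PySem.Str.splitlines text).foldl pvStepA ([], PySem.Dict.mk [], none)
  if st.2.1.items ≠ [] then st.1 ++ [st.2.1.items] else st.1

-- ===== PORT B =====
-- B-side helpers: one fold groups the lines into paragraphs (pvStepGroup), then each group is
-- parsed independently (pvStepField / pvParseParagraph), exactly Source B's two phases.
def pvStepGroup (st : List (List String) × List String) (line : String) :
    List (List String) × List String :=
  if line = "" then (if st.2 ≠ [] then st.1 ++ [st.2] else st.1, [])
  else (st.1, st.2 ++ [line])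

def pvStepField (st : PySem.Dict String String × Option String) (line : String) :
    PySem.Dict String String × Option String :=
  if PySem.Str.startswith line " " || PySem.Str.startswith line "\t" then
    match st.2 with
    | none => st
    | some k =>
        (PySem.Dict.modify st.1 k ""
          (fun v => v ++ ("\n" ++ PySem.Str.slice line (some 1) none)), some k)
  else
    match PySem.Str.splitMax? line ":" 1 with
    | some (key :: value :: _) =>
        (PySem.Dict.insert st.1 key (PySem.Str.strip value), some key)
    | _ => st

def pvParseParagraph (lines : List String) : List (String × String) :=
  (lines.foldl pvStepField (PySem.Dict.mk [], none)).1.items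

def parse_deb822_paragraphs_alt (text : String) : List (List (String × String)) :=
  let st := (PySem.Str.splitlines text).foldl pvStepGroup ([], [])
  let groups := if st.2 ≠ [] then st.1 ++ [st.2] else st.1
  groups.map pvParseParagraph

-- ===== PRECONDITION & SPEC =====
-- Pre_ excludes exactly the inputs on which A raises ValueError (B raises the same ValueError
-- there): a non-blank line starting with space/tab whose predecessor is absent or blank
-- ("continuation line without a key"), or a non-blank non-continuation line with no ':'.
-- The Bool carried by pvGoodLines says "the previous line exists and is non-blank".
def pvGoodLines : Bool → List String → Bool
  | _, [] => true
  | prev, l :: rest =>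
    if l = "" then pvGoodLines false rest
    else if PySem.Str.startswith l " " || PySem.Str.startswith l "\t" then
      prev && pvGoodLines true rest
    else
      PySem.Str.isIn ":" l && pvGoodLines true rest

def Pre_parse_deb822_paragraphs (text : String) : Prop :=
  pvGoodLines false (PySem.Str.splitlines text) = true
instance (text : String) : Decidable (Pre_parse_deb822_paragraphs text) := by
  unfold Pre_parse_deb822_paragraphs; infer_instance

def pvWitness_parse_deb822_paragraphs : String :=
  "Package: foo\nDescription: bar\n more\n\nPackage: baz\n"

def Spec_parse_deb822_paragraphs (text : String) (out : List (List (String × String))) : Prop :=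
  out = parse_deb822_paragraphs_alt text
instance (text : String) (out : List (List (String × String))) :
    Decidable (Spec_parse_deb822_paragraphs text out) := by
  unfold Spec_parse_deb822_paragraphs; infer_instance

-- ===== CLAIM (what is proved, stated in full; the proofs are below) =====
def Claim_equal_parse_deb822_paragraphs : Prop := ∀ (text : String), Dom_parse_deb822_paragraphs text → Pre_parse_deb822_paragraphs text → Spec_parse_deb822_paragraphs text (parse_deb822_paragraphs text)

-- ===== LEMMAS AND PROOFS =====

lemma pvGo0 (f : Nat) (l' : List Char) (acc : List (List Char)) :
    PySem.Chars.splitOnMax.go [':'] f 0 l' [] acc = acc.reverse ++ [l'] := by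
  cases f <;> cases l' <;> simp [PySem.Chars.splitOnMax.go]

lemma pvGoColon : ∀ (f : Nat) (l cur : List Char) (acc : List (List Char)), l.length < f → ':' ∈ l →
    ∃ a b, PySem.Chars.splitOnMax.go [':'] f 1 l cur acc = acc.reverse ++ [a, b] := by
  intro f
  induction f with
  | zero => intro l cur acc h _; omega
  | succ f ih =>
    intro l cur acc h hm
    cases l with
    | nil => simp at hm
    | cons c rest =>
      by_cases hc : c = ':'
      · subst hc
        refine ⟨cur.reverse, rest, ?_⟩
        simp [PySem.Chars.splitOnMax.go, List.isPrefixOf, pvGo0]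
      · have hm' : ':' ∈ rest := by simpa [hc, eq_comm] using hm
        obtain ⟨a, b, hab⟩ := ih rest (c :: cur) acc (by simp at h ⊢; omega) hm'
        refine ⟨a, b, ?_⟩
        rw [PySem.Chars.splitOnMax.go]
        rw [if_neg (by omega : ¬(1 = 0)),
            if_neg (by simp [List.isPrefixOf]; exact fun h => hc h.symm)]
        exact hab

lemma pvSplit_colon (l : String) (h : PySem.Str.isIn ":" l = true) :
    ∃ k v rest, PySem.Str.splitMax? l ":" 1 = some (k :: v :: rest) := by
  have hm : ':' ∈ l.toList := by
    have := (PySem.Chars.isIn_iff_infix (sub := ":".toList) (s := l.toList)).1 (by simpa using h)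
    simpa using this.mem (by simp)
  obtain ⟨a, b, hab⟩ := pvGoColon (l.toList.length + 1) l.toList [] [] (by omega) hm
  simp only [String.length_toList] at hab
  refine ⟨String.ofList a, String.ofList b, [], ?_⟩
  simp [PySem.Str.splitMax?, PySem.Chars.splitMax?, PySem.Chars.splitOnMax, hab]

lemma pvInsert_items_ne_nil (d : PySem.Dict String String) (k v : String) :
    (d.insert k v).items ≠ [] := by
  unfold PySem.Dict.insert
  split
  · rename_i hc
    unfold PySem.Dict.contains at hc
    intro h
    rw [List.map_eq_nil_iff] at h
    simp [h] at hc
  · simp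

def pvPS (buf : List String) : PySem.Dict String String × Option String :=
  buf.foldl pvStepField (PySem.Dict.mk [], none)

@[simp] lemma pvPS_nil : pvPS [] = (PySem.Dict.mk [], none) := rfl

@[simp] lemma pvParseParagraph_eq (buf : List String) :
    pvParseParagraph buf = (pvPS buf).1.items := rfl

lemma pvPS_snoc (buf : List String) (l : String) :
    pvPS (buf ++ [l]) = pvStepField (pvPS buf) l := by
  simp [pvPS, List.foldl_append]

def pvFinishA (st : List (List (String × String)) × PySem.Dict String String × Option String) :
    List (List (String × String)) :=
  if st.2.1.items ≠ [] then st.1 ++ [st.2.1.items] else st.1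

def pvFinishG (st : List (List String) × List String) : List (List String) :=
  if st.2 ≠ [] then st.1 ++ [st.2] else st.1

def pvInv (buf : List String) : Prop :=
  buf ≠ [] → (pvPS buf).2.isSome = true ∧ (pvPS buf).1.items ≠ []

lemma pvMain (lines : List String) : ∀ (gs : List (List String)) (buf : List String),
    pvGoodLines (!buf.isEmpty) lines = true → pvInv buf →
    pvFinishA (lines.foldl pvStepA (gs.map pvParseParagraph, pvPS buf))
      = (pvFinishG (lines.foldl pvStepGroup (gs, buf))).map pvParseParagraph := by
  induction lines with
  | nil =>
    intro gs buf _ hinv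
    by_cases hb : buf = []
    · subst hb
      simp [pvFinishA, pvFinishG]
    · obtain ⟨_, hne⟩ := hinv hb
      simp [pvFinishA, pvFinishG, hb, hne]
  | cons l rest ih =>
    intro gs buf hgood hinv
    by_cases hl : l = ""
    · subst hl
      have hgood : pvGoodLines false rest = true := by
        rw [pvGoodLines] at hgood; simpa using hgood
      by_cases hb : buf = []
      · subst hb
        have h1 : pvStepA (gs.map pvParseParagraph, pvPS []) "" = (gs.map pvParseParagraph, pvPS []) := by
          simp [pvStepA]
        have h2 : pvStepGroup (gs, []) "" = (gs, []) := by simp [pvStepGroup]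
        simpa [h1, h2] using ih gs [] (by simpa using hgood) (by intro h; simp at h)
      · obtain ⟨_, hne⟩ := hinv hb
        have h1 : pvStepA (gs.map pvParseParagraph, pvPS buf) ""
            = ((gs ++ [buf]).map pvParseParagraph, pvPS []) := by
          simp [pvStepA, hne]
        have h2 : pvStepGroup (gs, buf) "" = (gs ++ [buf], []) := by simp [pvStepGroup, hb]
        simpa [h1, h2] using ih (gs ++ [buf]) [] (by simpa using hgood) (by intro h; simp at h)
    · rw [pvGoodLines] at hgood
      simp only [if_neg hl] at hgood
      by_cases hcont : (PySem.Str.startswith l " " || PySem.Str.startswith l "\t") = true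
      · have hcont' := hcont
        simp at hcont'
        rw [if_pos hcont, Bool.and_eq_true] at hgood
        obtain ⟨hprev, hrest⟩ := hgood
        have hb : buf ≠ [] := by
          intro h; subst h; simp at hprev
        obtain ⟨hsome, hne⟩ := hinv hb
        obtain ⟨k, hk⟩ := Option.isSome_iff_exists.1 hsome
        have h1 : pvStepA (gs.map pvParseParagraph, pvPS buf) l
            = (gs.map pvParseParagraph, pvPS (buf ++ [l])) := by
          rw [pvPS_snoc]
          simp [pvStepA, pvStepField, hl, hcont', hk]
        have h2 : pvStepGroup (gs, buf) l = (gs, buf ++ [l]) := by simp [pvStepGroup, hl]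
        have hinv' : pvInv (buf ++ [l]) := by
          intro _
          rw [pvPS_snoc]
          simp [pvStepField, hcont', hk]
          exact fun h => pvInsert_items_ne_nil _ _ _ (by simpa [PySem.Dict.modify] using h)
        simpa [h1, h2] using ih gs (buf ++ [l]) (by rw [show (!(buf ++ [l]).isEmpty) = true by simp]; exact hrest) hinv'
      · have hcont' := hcont
        simp at hcont'
        rw [if_neg hcont, Bool.and_eq_true] at hgood
        obtain ⟨hcol, hrest⟩ := hgood
        obtain ⟨k, v, r, hsplit⟩ := pvSplit_colon l hcol
        have h1 : pvStepA (gs.map pvParseParagraph, pvPS buf) l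
            = (gs.map pvParseParagraph, pvPS (buf ++ [l])) := by
          rw [pvPS_snoc]
          simp [pvStepA, pvStepField, hl, hcont', hsplit]
        have h2 : pvStepGroup (gs, buf) l = (gs, buf ++ [l]) := by simp [pvStepGroup, hl]
        have hinv' : pvInv (buf ++ [l]) := by
          intro _
          rw [pvPS_snoc]
          simp [pvStepField, hcont', hsplit]
          exact fun h => pvInsert_items_ne_nil _ _ _ h
        simpa [h1, h2] using ih gs (buf ++ [l]) (by rw [show (!(buf ++ [l]).isEmpty) = true by simp]; exact hrest) hinv'

-- ===== VERDICT (by name: the statement is the Claim_ definition above) =====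
theorem parse_deb822_paragraphs_spec : Claim_equal_parse_deb822_paragraphs := by
  intro text _ hpre
  unfold Spec_parse_deb822_paragraphs parse_deb822_paragraphs parse_deb822_paragraphs_alt
  have h := pvMain (PySem.Str.splitlines text) [] []
    (by simpa using hpre) (by intro h; simp at h)
  simpa [pvFinishA, pvFinishG] using h
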